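-- pv_equiv track=rewrite | github.com/infonodesETS/manintheloop | wikidata_inspector/scripts/sync_anagrafica.py | normalize_country
-- ===== SOURCE A (Python) =====
-- def normalize_country(name):
--     """
--     Unify country names (e.g., China, People's Republic of China, Cina -> China).
--     """
--     if not name or str(name).lower() == 'nan':
--         return "Unknown"
--
--     name_clean = name.strip().lower()
--
--     # China normalization
--     china_variants = ["china", "people's republic of china", "cina", "prc"]
--     if any(v == name_clean for v in china_variants) or "people's republic of china" in name_clean:
--         return "China"
--
--     # USA normalization
--     usa_variants = ["united states", "usa", "united states of america", "u.s.a.", "u.s."]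
--     if any(v == name_clean for v in usa_variants) or "united states of america" in name_clean:
--         return "United States"
--
--     # UK normalization
--     uk_variants = ["united kingdom", "uk", "u.k.", "great britain"]
--     if any(v == name_clean for v in uk_variants):
--         return "United Kingdom"
--
--     # Czechia normalization
--     czech_variants = ["czech republic", "czechia", "czech rep."]
--     if any(v == name_clean for v in czech_variants):
--         return "Czechia"
--
--     # Taiwan normalization
--     taiwan_variants = ["taiwan", "republic of china", "taiwan, province of china"]
--     if any(v == name_clean for v in taiwan_variants):
--         return "Taiwan"
--
--     # Netherlands normalization
--     netherlands_variants = ["netherlands", "the netherlands", "kingdom of the netherlands"]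
--     if any(v == name_clean for v in netherlands_variants):
--         return "Netherlands"
--
--     # UK normalization
--     uk_variants = ["united kingdom", "uk", "u.k.", "great britain"]
--     if any(v == name_clean for v in uk_variants):
--         return "United Kingdom"
--
--     # South Korea normalization
--     skorea_variants = ["south korea", "republic of korea", "korea, south", "korea (republic of)"]
--     if any(v == name_clean for v in skorea_variants):
--         return "South Korea"
--
--     # Russia normalization
--     russia_variants = ["russia", "russian federation"]
--     if any(v == name_clean for v in russia_variants):
--         return "Russia"
--
--     return name.strip().title() # title() ensures 'France', not 'france' or 'FRANCE'
-- ===== SOURCE B (Python) =====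
-- # B: one canonical-name table (variant -> canonical) replaces the nine sequential branch blocks;
-- # the two substring guards are kept in A's priority order.
--
-- _CANON = {}
-- for _canonical, _variants in [
--     ("China", ["china", "people's republic of china", "cina", "prc"]),
--     ("United States", ["united states", "usa", "united states of america", "u.s.a.", "u.s."]),
--     ("United Kingdom", ["united kingdom", "uk", "u.k.", "great britain"]),
--     ("Czechia", ["czech republic", "czechia", "czech rep."]),
--     ("Taiwan", ["taiwan", "republic of china", "taiwan, province of china"]),
--     ("Netherlands", ["netherlands", "the netherlands", "kingdom of the netherlands"]),
--     ("South Korea", ["south korea", "republic of korea", "korea, south", "korea (republic of)"]),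
--     ("Russia", ["russia", "russian federation"]),
-- ]:
--     for _v in _variants:
--         _CANON[_v] = _canonical
--
--
-- def normalize_country(name):
--     if not name or str(name).lower() == 'nan':
--         return "Unknown"
--     name_clean = name.strip().lower()
--     if "people's republic of china" in name_clean:
--         return "China"
--     if "united states of america" in name_clean:
--         return "United States"
--     canonical = _CANON.get(name_clean)
--     if canonical is not None:
--         return canonical
--     return name.strip().title()
-- ===== Notes on version B (the rewrite author's own statement) =====
-- stated objective: simpler
-- what changed: The nine sequential variant-list scans are replaced by one variant->canonical dict built once and a single lookup, with only the two substring guards kept in priority order.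
import Mathlib
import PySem

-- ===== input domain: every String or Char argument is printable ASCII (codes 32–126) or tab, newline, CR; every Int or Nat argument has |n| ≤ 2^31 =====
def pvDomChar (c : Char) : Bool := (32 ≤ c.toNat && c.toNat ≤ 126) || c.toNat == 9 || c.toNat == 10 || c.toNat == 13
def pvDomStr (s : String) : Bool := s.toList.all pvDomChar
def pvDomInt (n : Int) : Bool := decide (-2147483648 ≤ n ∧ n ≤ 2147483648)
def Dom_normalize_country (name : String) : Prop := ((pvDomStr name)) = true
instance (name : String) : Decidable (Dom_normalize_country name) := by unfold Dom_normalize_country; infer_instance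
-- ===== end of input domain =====

-- B replaces A's nine sequential variant-list scans by one variant→canonical table and a single
-- lookup (the two substring guards kept in priority order): simpler, same results.

-- shared helper: Python str.title(), ported by hand (exact on the ASCII domain, where
-- "cased" character = ASCII letter)
def pyTitleChars : List Char → Bool → List Char
  | [], _ => []
  | c :: rest, prevAlpha =>
    (if PySem.Chars.isalpha c then
        (if prevAlpha then PySem.Chars.lowerChar c else PySem.Chars.upperChar c)
      else c) :: pyTitleChars rest (PySem.Chars.isalpha c)

def pyTitle (s : String) : String := String.ofList (pyTitleChars s.toList false)

-- ===== PORT A =====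
def normalize_country (name : String) : String :=
  if name = "" || PySem.Str.lower name = "nan" then "Unknown"
  else
    let nc := PySem.Str.lower (PySem.Str.strip name)
    if (["china", "people's republic of china", "cina", "prc"].any (fun v => v == nc))
        || PySem.Str.isIn "people's republic of china" nc then "China"
    else if (["united states", "usa", "united states of america", "u.s.a.", "u.s."].any (fun v => v == nc))
        || PySem.Str.isIn "united states of america" nc then "United States"
    else if ["united kingdom", "uk", "u.k.", "great britain"].any (fun v => v == nc) then "United Kingdom"
    else if ["czech republic", "czechia", "czech rep."].any (fun v => v == nc) then "Czechia"
    else if ["taiwan", "republic of china", "taiwan, province of china"].any (fun v => v == nc) then "Taiwan"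
    else if ["netherlands", "the netherlands", "kingdom of the netherlands"].any (fun v => v == nc) then "Netherlands"
    -- duplicated UK block, kept as in A
    else if ["united kingdom", "uk", "u.k.", "great britain"].any (fun v => v == nc) then "United Kingdom"
    else if ["south korea", "republic of korea", "korea, south", "korea (republic of)"].any (fun v => v == nc) then "South Korea"
    else if ["russia", "russian federation"].any (fun v => v == nc) then "Russia"
    else pyTitle (PySem.Str.strip name)

-- ===== PORT B =====
-- the table built once in Source B (variant → canonical), in insertion order
def countryTable : PySem.Dict String String := PySem.Dict.ofList
  [("china", "China"), ("people's republic of china", "China"), ("cina", "China"), ("prc", "China"),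
   ("united states", "United States"), ("usa", "United States"), ("united states of america", "United States"),
   ("u.s.a.", "United States"), ("u.s.", "United States"),
   ("united kingdom", "United Kingdom"), ("uk", "United Kingdom"), ("u.k.", "United Kingdom"),
   ("great britain", "United Kingdom"),
   ("czech republic", "Czechia"), ("czechia", "Czechia"), ("czech rep.", "Czechia"),
   ("taiwan", "Taiwan"), ("republic of china", "Taiwan"), ("taiwan, province of china", "Taiwan"),
   ("netherlands", "Netherlands"), ("the netherlands", "Netherlands"), ("kingdom of the netherlands", "Netherlands"),
   ("south korea", "South Korea"), ("republic of korea", "South Korea"), ("korea, south", "South Korea"),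
   ("korea (republic of)", "South Korea"),
   ("russia", "Russia"), ("russian federation", "Russia")]

def normalize_country_alt (name : String) : String :=
  if name = "" || PySem.Str.lower name = "nan" then "Unknown"
  else
    let nc := PySem.Str.lower (PySem.Str.strip name)
    if PySem.Str.isIn "people's republic of china" nc then "China"
    else if PySem.Str.isIn "united states of america" nc then "United States"
    else match countryTable.get? nc with
      | some c => c
      | none => pyTitle (PySem.Str.strip name)

-- ===== PRECONDITION & SPEC =====
def Spec_normalize_country (name : String) (out : String) : Prop := out = normalize_country_alt name
instance (name : String) (out : String) : Decidable (Spec_normalize_country name out) := by unfold Spec_normalize_country; infer_instance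

-- ===== CLAIM (what is proved, stated in full; the proofs are below) =====
def Claim_equal_normalize_country : Prop := ∀ (name : String), Dom_normalize_country name → Spec_normalize_country name (normalize_country name)

-- ===== LEMMAS AND PROOFS =====

-- the two branch chains agree for any cleaned string s and fallback value fb
set_option maxRecDepth 16384 in
set_option maxHeartbeats 2000000 in
lemma chains_eq (s fb : String) :
    (if (["china", "people's republic of china", "cina", "prc"].any (fun v => v == s))
        || PySem.Str.isIn "people's republic of china" s then "China"
    else if (["united states", "usa", "united states of america", "u.s.a.", "u.s."].any (fun v => v == s))
        || PySem.Str.isIn "united states of america" s then "United States"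
    else if ["united kingdom", "uk", "u.k.", "great britain"].any (fun v => v == s) then "United Kingdom"
    else if ["czech republic", "czechia", "czech rep."].any (fun v => v == s) then "Czechia"
    else if ["taiwan", "republic of china", "taiwan, province of china"].any (fun v => v == s) then "Taiwan"
    else if ["netherlands", "the netherlands", "kingdom of the netherlands"].any (fun v => v == s) then "Netherlands"
    else if ["united kingdom", "uk", "u.k.", "great britain"].any (fun v => v == s) then "United Kingdom"
    else if ["south korea", "republic of korea", "korea, south", "korea (republic of)"].any (fun v => v == s) then "South Korea"
    else if ["russia", "russian federation"].any (fun v => v == s) then "Russia"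
    else fb) =
    (if PySem.Str.isIn "people's republic of china" s then "China"
    else if PySem.Str.isIn "united states of america" s then "United States"
    else match countryTable.get? s with
      | some c => c
      | none => fb) := by
  by_cases h1 : PySem.Str.isIn "people's republic of china" s = true
  case pos => simp at h1; simp [h1]
  by_cases hk0 : "china" = s
  case pos => subst hk0; rfl
  by_cases hk1 : "people's republic of china" = s
  case pos => subst hk1; rfl
  by_cases hk2 : "cina" = s
  case pos => subst hk2; rfl
  by_cases hk3 : "prc" = s
  case pos => subst hk3; rfl
  by_cases hk4 : "united states" = s
  case pos => subst hk4; rfl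
  by_cases hk5 : "usa" = s
  case pos => subst hk5; rfl
  by_cases hk6 : "united states of america" = s
  case pos => subst hk6; rfl
  by_cases hk7 : "u.s.a." = s
  case pos => subst hk7; rfl
  by_cases hk8 : "u.s." = s
  case pos => subst hk8; rfl
  by_cases hk9 : "united kingdom" = s
  case pos => subst hk9; rfl
  by_cases hk10 : "uk" = s
  case pos => subst hk10; rfl
  by_cases hk11 : "u.k." = s
  case pos => subst hk11; rfl
  by_cases hk12 : "great britain" = s
  case pos => subst hk12; rfl
  by_cases hk13 : "czech republic" = s
  case pos => subst hk13; rfl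
  by_cases hk14 : "czechia" = s
  case pos => subst hk14; rfl
  by_cases hk15 : "czech rep." = s
  case pos => subst hk15; rfl
  by_cases hk16 : "taiwan" = s
  case pos => subst hk16; rfl
  by_cases hk17 : "republic of china" = s
  case pos => subst hk17; rfl
  by_cases hk18 : "taiwan, province of china" = s
  case pos => subst hk18; rfl
  by_cases hk19 : "netherlands" = s
  case pos => subst hk19; rfl
  by_cases hk20 : "the netherlands" = s
  case pos => subst hk20; rfl
  by_cases hk21 : "kingdom of the netherlands" = s
  case pos => subst hk21; rfl
  by_cases hk22 : "south korea" = s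
  case pos => subst hk22; rfl
  by_cases hk23 : "republic of korea" = s
  case pos => subst hk23; rfl
  by_cases hk24 : "korea, south" = s
  case pos => subst hk24; rfl
  by_cases hk25 : "korea (republic of)" = s
  case pos => subst hk25; rfl
  by_cases hk26 : "russia" = s
  case pos => subst hk26; rfl
  by_cases hk27 : "russian federation" = s
  case pos => subst hk27; rfl
  have hitems : countryTable.items = [("china", "China"), ("people's republic of china", "China"), ("cina", "China"), ("prc", "China"), ("united states", "United States"), ("usa", "United States"), ("united states of america", "United States"), ("u.s.a.", "United States"), ("u.s.", "United States"), ("united kingdom", "United Kingdom"), ("uk", "United Kingdom"), ("u.k.", "United Kingdom"), ("great britain", "United Kingdom"), ("czech republic", "Czechia"), ("czechia", "Czechia"), ("czech rep.", "Czechia"), ("taiwan", "Taiwan"), ("republic of china", "Taiwan"), ("taiwan, province of china", "Taiwan"), ("netherlands", "Netherlands"), ("the netherlands", "Netherlands"), ("kingdom of the netherlands", "Netherlands"), ("south korea", "South Korea"), ("republic of korea", "South Korea"), ("korea, south", "South Korea"), ("korea (republic of)", "South Korea"), ("russia", "Russia"), ("russian federation", "Russia")] := by decide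
  simp [PySem.Dict.get?, hitems, hk0, hk1, hk2, hk3, hk4, hk5, hk6, hk7, hk8, hk9, hk10, hk11, hk12, hk13, hk14, hk15, hk16, hk17, hk18, hk19, hk20, hk21, hk22, hk23, hk24, hk25, hk26, hk27]

-- ===== VERDICT (by name: the statement is the Claim_ definition above) =====
theorem normalize_country_spec : Claim_equal_normalize_country := by
  intro name _
  unfold Spec_normalize_country normalize_country normalize_country_alt
  split
  · rfl
  · exact chains_eq _ _
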